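-- pv_equiv track=rewrite | github.com/DevSwat-ResonantGenesis/ORG_Core | chat_service/app/domain/provider/context_adapter.py | get_context_stats
-- ===== SOURCE A (Python) =====
-- from typing import List, Dict, Any, Optional, Tuple
--
-- def get_context_stats(context: Optional[List[Dict[str, Any]]]) -> Dict[str, int]:
--     """
--     Get statistics about context.
--
--     Returns dict with counts of system, user, assistant messages.
--     """
--     if not context:
--         return {"system": 0, "user": 0, "assistant": 0, "total": 0}
--
--     stats = {"system": 0, "user": 0, "assistant": 0, "other": 0}
--
--     for msg in context:
--         if not isinstance(msg, dict):
--             continue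
--
--         role = msg.get("role", "unknown")
--         if role in stats:
--             stats[role] += 1
--         else:
--             stats["other"] += 1
--
--     stats["total"] = sum(stats.values())
--     return stats
-- ===== SOURCE B (Python) =====
-- from typing import List, Dict, Any, Optional
--
--
-- def get_context_stats(context: Optional[List[Dict[str, Any]]]) -> Dict[str, int]:
--     """Count messages by role via staged .count() passes and derived arithmetic."""
--     if not context:
--         return {"system": 0, "user": 0, "assistant": 0, "total": 0}
--
--     roles = [m.get("role", "unknown") for m in context if isinstance(m, dict)]
--     s = roles.count("system")
--     u = roles.count("user")
--     a = roles.count("assistant")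
--     return {
--         "system": s,
--         "user": u,
--         "assistant": a,
--         "other": len(roles) - s - u - a,
--         "total": len(roles),
--     }
-- ===== Notes on version B (the rewrite author's own statement) =====
-- stated objective: simpler
-- what changed: B keeps no running counters at all: it extracts the role list once, obtains the three standard buckets by separate list.count() passes, and derives 'other' and 'total' arithmetically from len(roles), whereas A maintains a mutable four-bucket dict with an in-loop membership branch and a final sum over its values.
import Mathlib
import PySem

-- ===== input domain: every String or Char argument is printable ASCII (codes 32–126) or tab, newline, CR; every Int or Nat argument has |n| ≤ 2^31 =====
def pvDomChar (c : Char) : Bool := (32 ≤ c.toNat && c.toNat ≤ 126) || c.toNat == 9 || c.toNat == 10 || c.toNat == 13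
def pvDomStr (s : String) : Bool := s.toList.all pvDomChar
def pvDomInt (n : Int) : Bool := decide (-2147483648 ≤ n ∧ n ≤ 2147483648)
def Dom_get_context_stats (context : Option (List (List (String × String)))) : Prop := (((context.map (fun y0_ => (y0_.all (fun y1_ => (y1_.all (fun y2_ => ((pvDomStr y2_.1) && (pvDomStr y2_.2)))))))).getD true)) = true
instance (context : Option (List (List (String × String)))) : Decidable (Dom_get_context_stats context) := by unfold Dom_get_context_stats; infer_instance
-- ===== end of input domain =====

-- B keeps no running counters: it extracts the role list once, counts the three
-- standard buckets by separate .count passes and derives 'other' and 'total'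
-- arithmetically from the list length (objective: simpler, same linear cost).

-- ===== PORT A =====
def get_context_stats (context : Option (List (List (String × String)))) : List (String × Int) :=
  match context with
  | none => [("system", 0), ("user", 0), ("assistant", 0), ("total", 0)]
  | some ctx =>
    if ctx = [] then [("system", 0), ("user", 0), ("assistant", 0), ("total", 0)]
    else
      let stats0 : PySem.Dict String Int :=
        PySem.Dict.mk [("system", 0), ("user", 0), ("assistant", 0), ("other", 0)]
      let stats := ctx.foldl (fun stats msg =>
        let role := (PySem.Dict.mk msg).getD "role" "unknown"
        if stats.contains role then stats.modify role 0 (· + 1)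
        else stats.modify "other" 0 (· + 1)) stats0
      (stats.insert "total" stats.values.sum).items

-- ===== PORT B =====
-- every element of the Lean context is a dict by type, so Python's
-- 'if isinstance(m, dict)' filter keeps every element and is omitted here
def get_context_stats_alt (context : Option (List (List (String × String)))) : List (String × Int) :=
  match context with
  | none => [("system", 0), ("user", 0), ("assistant", 0), ("total", 0)]
  | some ctx =>
    if ctx = [] then [("system", 0), ("user", 0), ("assistant", 0), ("total", 0)]
    else
      let roles := ctx.map (fun m => (PySem.Dict.mk m).getD "role" "unknown")
      let s : Int := roles.count "system"
      let u : Int := roles.count "user"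
      let a : Int := roles.count "assistant"
      [("system", s), ("user", u), ("assistant", a),
       ("other", (roles.length : Int) - s - u - a),
       ("total", (roles.length : Int))]

-- ===== PRECONDITION & SPEC =====
def Spec_get_context_stats (context : Option (List (List (String × String)))) (out : List (String × Int)) : Prop := out = get_context_stats_alt context
instance (context : Option (List (List (String × String)))) (out : List (String × Int)) : Decidable (Spec_get_context_stats context out) := by unfold Spec_get_context_stats; infer_instance

-- ===== CLAIM (what is proved, stated in full; the proofs are below) =====
def Claim_equal_get_context_stats : Prop := ∀ (context : Option (List (List (String × String)))), Dom_get_context_stats context → Spec_get_context_stats context (get_context_stats context)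

-- ===== LEMMAS AND PROOFS =====

-- the role of one message, as both ports read it
def pvRole (msg : List (String × String)) : String :=
  (PySem.Dict.mk msg).getD "role" "unknown"

-- "role is not one of the three standard buckets"
def pvOther (r : String) : Bool :=
  !(r == "system" || r == "user" || r == "assistant")

-- A's loop, started from any bucket values, adds the per-role counts to the buckets
theorem pvAfold (l : List (List (String × String))) (x y z w : Int) :
    l.foldl (fun stats msg =>
        let role := (PySem.Dict.mk msg).getD "role" "unknown"
        if stats.contains role then stats.modify role 0 (· + 1)
        else stats.modify "other" 0 (· + 1))
      (PySem.Dict.mk [("system", x), ("user", y), ("assistant", z), ("other", w)]) =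
    PySem.Dict.mk [("system", x + ((l.map pvRole).count "system" : Int)),
                   ("user", y + ((l.map pvRole).count "user" : Int)),
                   ("assistant", z + ((l.map pvRole).count "assistant" : Int)),
                   ("other", w + ((l.map pvRole).countP pvOther : Int))] := by
  induction l generalizing x y z w with
  | nil => simp
  | cons m l ih =>
    simp only [List.foldl_cons, List.map_cons]
    rw [show ((PySem.Dict.mk m).getD "role" "unknown") = pvRole m from rfl]
    by_cases hs : pvRole m = "system"
    · rw [hs,
        show (PySem.Dict.mk [("system", x), ("user", y), ("assistant", z), ("other", w)]).contains "system" = true by simp [PySem.Dict.contains],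
        if_pos rfl,
        show (PySem.Dict.mk [("system", x), ("user", y), ("assistant", z), ("other", w)]).modify "system" 0 (· + 1) = PySem.Dict.mk [("system", x + 1), ("user", y), ("assistant", z), ("other", w)] by
          simp [PySem.Dict.modify, PySem.Dict.insert, PySem.Dict.getD, PySem.Dict.get?, PySem.Dict.contains],
        ih]
      simp [pvOther]
      omega
    · by_cases hu : pvRole m = "user"
      · rw [hu,
          show (PySem.Dict.mk [("system", x), ("user", y), ("assistant", z), ("other", w)]).contains "user" = true by simp [PySem.Dict.contains],
          if_pos rfl,
          show (PySem.Dict.mk [("system", x), ("user", y), ("assistant", z), ("other", w)]).modify "user" 0 (· + 1) = PySem.Dict.mk [("system", x), ("user", y + 1), ("assistant", z), ("other", w)] by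
            simp [PySem.Dict.modify, PySem.Dict.insert, PySem.Dict.getD, PySem.Dict.get?, PySem.Dict.contains],
          ih]
        simp [pvOther]
        omega
      · by_cases ha : pvRole m = "assistant"
        · rw [ha,
            show (PySem.Dict.mk [("system", x), ("user", y), ("assistant", z), ("other", w)]).contains "assistant" = true by simp [PySem.Dict.contains],
            if_pos rfl,
            show (PySem.Dict.mk [("system", x), ("user", y), ("assistant", z), ("other", w)]).modify "assistant" 0 (· + 1) = PySem.Dict.mk [("system", x), ("user", y), ("assistant", z + 1), ("other", w)] by
              simp [PySem.Dict.modify, PySem.Dict.insert, PySem.Dict.getD, PySem.Dict.get?, PySem.Dict.contains],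
            ih]
          simp [pvOther]
          omega
        · by_cases ho : pvRole m = "other"
          · rw [ho,
              show (PySem.Dict.mk [("system", x), ("user", y), ("assistant", z), ("other", w)]).contains "other" = true by simp [PySem.Dict.contains],
              if_pos rfl,
              show (PySem.Dict.mk [("system", x), ("user", y), ("assistant", z), ("other", w)]).modify "other" 0 (· + 1) = PySem.Dict.mk [("system", x), ("user", y), ("assistant", z), ("other", w + 1)] by
                simp [PySem.Dict.modify, PySem.Dict.insert, PySem.Dict.getD, PySem.Dict.get?, PySem.Dict.contains],
              ih]
            simp [pvOther]
            omega
          · have hs' := Ne.symm hs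
            have hu' := Ne.symm hu
            have ha' := Ne.symm ha
            have ho' := Ne.symm ho
            rw [show (PySem.Dict.mk [("system", x), ("user", y), ("assistant", z), ("other", w)]).contains (pvRole m) = false by simp [PySem.Dict.contains, hs', hu', ha', ho'],
              if_neg (by simp),
              show (PySem.Dict.mk [("system", x), ("user", y), ("assistant", z), ("other", w)]).modify "other" 0 (· + 1) = PySem.Dict.mk [("system", x), ("user", y), ("assistant", z), ("other", w + 1)] by
                simp [PySem.Dict.modify, PySem.Dict.insert, PySem.Dict.getD, PySem.Dict.get?, PySem.Dict.contains],
              ih]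
            simp [pvOther, hs, hu, ha]
            omega

-- the four buckets partition the role list
theorem pvPartition (rs : List String) :
    rs.count "system" + rs.count "user" + rs.count "assistant" + rs.countP pvOther
      = rs.length := by
  induction rs with
  | nil => simp
  | cons r rs ih =>
    by_cases hs : r = "system"
    · simp [hs, pvOther]; omega
    · by_cases hu : r = "user"
      · simp [hu, pvOther]; omega
      · by_cases ha : r = "assistant"
        · simp [ha, pvOther]; omega
        · have : pvOther r = true := by simp [pvOther, hs, hu, ha]
          simp [this, hs, hu, ha]
          omega

-- ===== VERDICT (by name: the statement is the Claim_ definition above) =====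
theorem get_context_stats_spec : Claim_equal_get_context_stats := by
  intro context _
  unfold Spec_get_context_stats
  match context with
  | none => rfl
  | some ctx =>
    by_cases hctx : ctx = []
    · subst hctx; rfl
    · simp only [get_context_stats, get_context_stats_alt, if_neg hctx]
      rw [pvAfold]
      have hpart := pvPartition (ctx.map pvRole)
      simp [PySem.Dict.insert, PySem.Dict.contains, PySem.Dict.values]
      simp only [show (fun m : List (String × String) => (PySem.Dict.mk m).getD "role" "unknown") = pvRole from rfl]
      simp only [List.countP_map, List.length_map] at hpart ⊢
      refine ⟨trivial, trivial, trivial, ?_, ?_⟩ <;> omega
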